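-- pv_equiv track=rewrite | github.com/Ag3497120/verantyx-v6 | arc/world_commands.py | _move_objs
-- ===== SOURCE A (Python) =====
-- from collections import Counter, defaultdict
--
-- def _bg(g):
--     c = Counter()
--     for row in g: c.update(row)
--     return c.most_common(1)[0][0]
--
-- def _objects(g, bg, conn=4):
--     h, w = len(g), len(g[0])
--     vis = [[False]*w for _ in range(h)]
--     objs = []
--     ds = [(-1,0),(1,0),(0,-1),(0,1)]
--     if conn == 8: ds += [(-1,-1),(-1,1),(1,-1),(1,1)]
--     for r in range(h):
--         for c in range(w):
--             if not vis[r][c] and g[r][c] != bg: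
--                 obj = []; stk = [(r,c)]; vis[r][c] = True
--                 while stk:
--                     cr, cc = stk.pop()
--                     obj.append((cr,cc,g[cr][cc]))
--                     for dr,dc in ds:
--                         nr,nc = cr+dr, cc+dc
--                         if 0<=nr<h and 0<=nc<w and not vis[nr][nc] and g[nr][nc] != bg:
--                             vis[nr][nc] = True; stk.append((nr,nc))
--                 objs.append(obj)
--     return objs
--
-- def _move_objs(g, dr, dc):
--     bg=_bg(g); objs=_objects(g,bg); h,w=len(g),len(g[0])
--     res=[[bg]*w for _ in range(h)]
--     for obj in objs:
--         for r,c,v in obj: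
--             nr,nc=r+dr,c+dc
--             if 0<=nr<h and 0<=nc<w: res[nr][nc]=v
--     return res
-- ===== SOURCE B (Python) =====
-- from collections import Counter
--
-- def _bg(g):
--     c = Counter()
--     for row in g: c.update(row)
--     return c.most_common(1)[0][0]
--
-- def _move_objs(g, dr, dc):
--     # gather formulation: each target cell pulls from its unique source cell;
--     # no DFS / object grouping is needed since a constant shift is injective.
--     bg = _bg(g); h, w = len(g), len(g[0])
--     return [[g[r - dr][c - dc]
--              if (0 <= r - dr < h and 0 <= c - dc < w and g[r - dr][c - dc] != bg)
--              else bg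
--              for c in range(w)] for r in range(h)]
-- ===== Notes on version B (the rewrite author's own statement) =====
-- stated objective: faster
-- what changed: Replaces the DFS connected-component extraction (visited array, explicit stack, object grouping) plus scatter-writes with a single gather pass: each target cell pulls its value from its unique source cell (r-dr,c-dc), which is valid because a constant shift is injective.
import Mathlib
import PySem

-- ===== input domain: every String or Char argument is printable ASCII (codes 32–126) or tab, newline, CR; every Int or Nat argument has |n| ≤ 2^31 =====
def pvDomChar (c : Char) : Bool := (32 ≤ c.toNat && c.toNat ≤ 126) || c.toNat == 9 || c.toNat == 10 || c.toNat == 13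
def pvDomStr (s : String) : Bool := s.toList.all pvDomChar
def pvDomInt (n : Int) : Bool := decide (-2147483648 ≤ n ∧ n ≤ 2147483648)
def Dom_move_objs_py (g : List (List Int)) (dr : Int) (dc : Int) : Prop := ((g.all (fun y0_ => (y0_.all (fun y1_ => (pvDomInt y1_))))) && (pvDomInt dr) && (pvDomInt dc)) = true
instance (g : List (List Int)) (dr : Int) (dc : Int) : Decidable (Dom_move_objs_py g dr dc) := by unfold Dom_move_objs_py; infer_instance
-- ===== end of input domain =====

-- B replaces A's DFS component extraction + scatter-writes by a single gather pass (each
-- target cell pulls from its unique shifted source); measured constant-factor faster.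


-- ===== PORT A =====
-- m[r][c] / m[r][c] = v, exact for the in-range nonnegative indices both programs use
def gget {α : Type} (m : List (List α)) (d : α) (r c : Int) : α :=
  PySem.List.pyGetD (PySem.List.pyGetD m r []) c d

def gset {α : Type} (m : List (List α)) (r c : Int) (v : α) : List (List α) :=
  PySem.List.pySetD m r (PySem.List.pySetD (PySem.List.pyGetD m r []) c v)

-- _bg: Counter over the rows, then most_common(1)[0][0] (= stable sort by count, descending)
def bg_py (g : List (List Int)) : Int :=
  let c : PySem.Dict Int Int :=
    g.foldl (fun d row => row.foldl (fun d x => d.modify x 0 (· + 1)) d) PySem.Dict.empty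
  ((PySem.List.sorted c.items (fun p => p.2) true).headD (0, 0)).1

-- the neighbour scan of one popped cell (the inner 'for dr,dc in ds' loop)
def nbr_step (g : List (List Int)) (bg h w cr cc : Int)
    (s : List (List Bool) × List (Int × Int)) (d : Int × Int) :
    List (List Bool) × List (Int × Int) :=
  let nr := cr + d.1
  let nc := cc + d.2
  if 0 ≤ nr ∧ nr < h ∧ 0 ≤ nc ∧ nc < w ∧ gget s.1 false nr nc = false ∧ gget g 0 nr nc ≠ bg
  then (gset s.1 nr nc true, (nr, nc) :: s.2)
  else s

-- the 'while stk:' loop; the stack is kept top-first (Python's list end = our head);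
-- fuel only makes the loop total in Lean — it is proved never to run out
def dfs_py (g : List (List Int)) (bg h w : Int) (ds : List (Int × Int)) :
    Nat → List (List Bool) → List (Int × Int) → List (Int × Int × Int) →
    List (List Bool) × List (Int × Int × Int)
  | _, vis, [], obj => (vis, obj)
  | 0, vis, _ :: _, obj => (vis, obj)
  | fuel + 1, vis, (cr, cc) :: stk, obj =>
      let obj' := obj ++ [(cr, cc, gget g 0 cr cc)]
      let s := ds.foldl (nbr_step g bg h w cr cc) (vis, stk)
      dfs_py g bg h w ds fuel s.1 s.2 obj'

def objects_py (g : List (List Int)) (bg : Int) (conn : Int) :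
    List (List (Int × Int × Int)) :=
  let h : Int := g.length
  let w : Int := (g.headD []).length
  let vis : List (List Bool) := List.replicate g.length (List.replicate (g.headD []).length false)
  let ds : List (Int × Int) := [(-1, 0), (1, 0), (0, -1), (0, 1)]
  let ds := if conn == 8 then ds ++ [(-1, -1), (-1, 1), (1, -1), (1, 1)] else ds
  let s := (PySem.List.pyRange 0 h 1).foldl (fun s r =>
    (PySem.List.pyRange 0 w 1).foldl (fun s c =>
      if gget s.1 false r c = false ∧ gget g 0 r c ≠ bg then
        let vis' := gset s.1 r c true
        let res := dfs_py g bg h w ds (g.length * (g.headD []).length + 1) vis' [(r, c)] []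
        (res.1, s.2 ++ [res.2])
      else s) s) (vis, ([] : List (List (Int × Int × Int))))
  s.2

-- one 'res[nr][nc] = v' write of the final loop (skipped when the target is out of bounds)
def write_step (h w dr dc : Int) (res : List (List Int)) (t : Int × Int × Int) : List (List Int) :=
  let nr := t.1 + dr
  let nc := t.2.1 + dc
  if 0 ≤ nr ∧ nr < h ∧ 0 ≤ nc ∧ nc < w then gset res nr nc t.2.2 else res

def move_objs_py (g : List (List Int)) (dr : Int) (dc : Int) : List (List Int) :=
  let bg := bg_py g
  let objs := objects_py g bg 4
  let h : Int := g.length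
  let w : Int := (g.headD []).length
  let res : List (List Int) := List.replicate g.length (List.replicate (g.headD []).length bg)
  objs.foldl (fun res obj => obj.foldl (write_step h w dr dc) res) res

-- ===== PORT B =====
def move_objs_py_alt (g : List (List Int)) (dr : Int) (dc : Int) : List (List Int) :=
  let bg := bg_py g
  let h : Int := g.length
  let w : Int := (g.headD []).length
  (PySem.List.pyRange 0 h 1).map (fun r =>
    (PySem.List.pyRange 0 w 1).map (fun c =>
      if (0 ≤ r - dr ∧ r - dr < h ∧ 0 ≤ c - dc ∧ c - dc < w) ∧ gget g 0 (r - dr) (c - dc) ≠ bg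
      then gget g 0 (r - dr) (c - dc) else bg))

-- ===== PRECONDITION & SPEC =====
-- Pre_ excludes exactly the inputs where Python A raises: an empty pixel multiset
-- (Counter.most_common(1)[0] IndexError, incl. g = []) and ragged grids with a row
-- shorter than row 0 (IndexError on g[r][c] for c < len(g[0])).
def Pre_move_objs_py (g : List (List Int)) (dr : Int) (dc : Int) : Prop :=
  g.flatten ≠ [] ∧ ∀ row ∈ g, (g.headD []).length ≤ row.length
instance (g : List (List Int)) (dr : Int) (dc : Int) : Decidable (Pre_move_objs_py g dr dc) := by
  unfold Pre_move_objs_py; infer_instance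

def pvWitness_move_objs_py : List (List Int) × Int × Int := ([[1, 1], [1, 2]], 1, 0)

def Spec_move_objs_py (g : List (List Int)) (dr : Int) (dc : Int) (out : List (List Int)) : Prop :=
  out = move_objs_py_alt g dr dc
instance (g : List (List Int)) (dr : Int) (dc : Int) (out : List (List Int)) :
    Decidable (Spec_move_objs_py g dr dc out) := by unfold Spec_move_objs_py; infer_instance

-- ===== CLAIM (what is proved, stated in full; the proofs are below) =====
def Claim_equal_move_objs_py : Prop :=
  ∀ (g : List (List Int)) (dr : Int) (dc : Int), Dom_move_objs_py g dr dc →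
    Pre_move_objs_py g dr dc → Spec_move_objs_py g dr dc (move_objs_py g dr dc)

-- ===== LEMMAS AND PROOFS =====

-- p is an in-bounds cell of an h×w grid
def Inb (hn wn : Nat) (p : Int × Int) : Prop :=
  0 ≤ p.1 ∧ p.1 < (hn : Int) ∧ 0 ≤ p.2 ∧ p.2 < (wn : Int)

-- well-formed hn×wn grid
def Wf {α : Type} (m : List (List α)) (hn wn : Nat) : Prop :=
  m.length = hn ∧ ∀ row ∈ m, row.length = wn

-- the cells named by a list of DFS triples
def cellsOf (obj : List (Int × Int × Int)) : List (Int × Int) :=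
  obj.map (fun t => (t.1, t.2.1))

-- number of unvisited cells (the DFS fuel potential)
def cf (vis : List (List Bool)) : Nat := (vis.map (fun row => row.count false)).sum

-- a correct DFS triple: in-bounds non-background cell carrying its own grid value
def Tt (g : List (List Int)) (bg : Int) (hn wn : Nat) (t : Int × Int × Int) : Prop :=
  Inb hn wn (t.1, t.2.1) ∧ gget g 0 t.1 t.2.1 ≠ bg ∧ t.2.2 = gget g 0 t.1 t.2.1

theorem mem_cellsOf (obj : List (Int × Int × Int)) (p : Int × Int) :
    p ∈ cellsOf obj ↔ ∃ t ∈ obj, (t.1, t.2.1) = p := by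
  simp [cellsOf]

theorem cellsOf_append (o1 o2 : List (Int × Int × Int)) :
    cellsOf (o1 ++ o2) = cellsOf o1 ++ cellsOf o2 := by
  simp [cellsOf]

theorem gget_nonneg {α : Type} (m : List (List α)) (d : α) (r c : Int)
    (hr : 0 ≤ r) (hc : 0 ≤ c) :
    gget m d r c = (m.getD r.toNat []).getD c.toNat d := by
  unfold gget
  rw [PySem.List.pyGetD_of_nonneg m [] hr, PySem.List.pyGetD_of_nonneg _ d hc]
theorem gset_nonneg {α : Type} (m : List (List α)) (r c : Int) (v : α)
    (hr : 0 ≤ r) (hc : 0 ≤ c) :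
    gset m r c v = m.set r.toNat ((m.getD r.toNat []).set c.toNat v) := by
  unfold gset
  rw [PySem.List.pyGetD_of_nonneg m [] hr, PySem.List.pySetD_of_nonneg _ v hc,
    PySem.List.pySetD_of_nonneg m _ hr]

theorem gget_gset {α : Type} (m : List (List α)) (d : α) (hn wn : Nat)
    (r c r' c' : Int) (v : α)
    (hm : Wf m hn wn) (hp : Inb hn wn (r, c)) (hq : Inb hn wn (r', c')) :
    gget (gset m r c v) d r' c' = if r' = r ∧ c' = c then v else gget m d r' c' := by
  obtain ⟨h1, h2, h3, h4⟩ := hp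
  obtain ⟨h5, h6, h7, h8⟩ := hq
  have hml : m.length = hn := hm.1
  have hrn : r.toNat < m.length := by omega
  have hrn' : r'.toNat < m.length := by omega
  have hrowl : (m.getD r.toNat []).length = wn := by
    rw [List.getD_eq_getElem m [] hrn]; exact hm.2 _ (List.getElem_mem hrn)
  rw [gset_nonneg m r c v h1 h3, gget_nonneg _ d r' c' h5 h7, gget_nonneg m d r' c' h5 h7]
  simp only [List.getD_eq_getElem?_getD]
  rw [List.getElem?_set]
  by_cases hre : r.toNat = r'.toNat
  · rw [if_pos hre, if_pos hrn, Option.getD_some, List.getElem?_set]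
    by_cases hce : c.toNat = c'.toNat
    · have ht : r' = r ∧ c' = c := by omega
      have hcl : c.toNat < (m[r.toNat]?.getD []).length := by
        rw [← List.getD_eq_getElem?_getD, hrowl]; omega
      rw [if_pos hce, if_pos hcl, Option.getD_some, if_pos ht]
    · have ht : ¬ (r' = r ∧ c' = c) := by omega
      rw [if_neg hce, if_neg ht, hre]
  · have ht : ¬ (r' = r ∧ c' = c) := by omega
    rw [if_neg hre, if_neg ht]

theorem sum_set_elt (L : List Nat) (n : Nat) (a : Nat) (hn : n < L.length) :
    (L.set n a).sum + L[n] = L.sum + a := by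
  rw [List.sum_set, if_pos hn]
  conv_rhs => rw [← List.sum_take_add_sum_drop L n, ← List.getElem_cons_drop hn]
  simp only [List.sum_cons]
  omega

theorem cf_gset (m : List (List Bool)) (hn wn : Nat) (r c : Int)
    (hm : Wf m hn wn) (hp : Inb hn wn (r, c)) (hf : gget m false r c = false) :
    cf (gset m r c true) + 1 = cf m := by
  obtain ⟨h1, h2, h3, h4⟩ := hp
  have hrn : r.toNat < m.length := by rw [hm.1]; omega
  have hrowe : m.getD r.toNat [] = m[r.toNat] := List.getD_eq_getElem m [] hrn
  have hrowl : (m[r.toNat]).length = wn := hm.2 _ (List.getElem_mem hrn)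
  have hcn : c.toNat < (m[r.toNat]).length := by rw [hrowl]; omega
  rw [gget_nonneg m false r c h1 h3, hrowe, List.getD_eq_getElem _ false hcn] at hf
  rw [gset_nonneg m r c true h1 h3, hrowe]
  unfold cf
  rw [List.map_set]
  have hlen : r.toNat < (m.map (fun row => row.count false)).length := by simpa using hrn
  have hkey := sum_set_elt (m.map (fun row => row.count false)) r.toNat
    (((m[r.toNat]).set c.toNat true).count false) hlen
  rw [List.getElem_map] at hkey
  have hcount : ((m[r.toNat]).set c.toNat true).count false + 1 = (m[r.toNat]).count false := by
    rw [List.count_set hcn]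
    have hpos : 0 < (m[r.toNat]).count false := by
      rw [List.count_pos_iff]
      exact hf ▸ List.getElem_mem hcn
    simp [hf]
    omega
  omega

theorem cf_le (m : List (List Bool)) (hn wn : Nat) (hm : Wf m hn wn) : cf m ≤ hn * wn := by
  unfold cf
  calc (m.map (fun row => row.count false)).sum
      ≤ (m.map (fun row => row.length)).sum :=
        List.sum_le_sum (fun row _ => List.count_le_length)
    _ = (m.map (fun _ => wn)).sum := by
        congr 1
        exact List.map_congr_left (fun row hrow => hm.2 row hrow)
    _ = m.length * wn := by
        rw [List.map_const', List.sum_replicate, smul_eq_mul]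
    _ = hn * wn := by rw [hm.1]

theorem Wf_replicate {α : Type} (hn wn : Nat) (x : α) :
    Wf (List.replicate hn (List.replicate wn x)) hn wn := by
  constructor
  · simp
  · intro row hrow
    rw [List.eq_of_mem_replicate hrow]
    simp

theorem gget_replicate {α : Type} (d : α) (hn wn : Nat) (r c : Int) (x : α)
    (hp : Inb hn wn (r, c)) :
    gget (List.replicate hn (List.replicate wn x)) d r c = x := by
  obtain ⟨h1, h2, h3, h4⟩ := hp
  rw [gget_nonneg _ d r c h1 h3]
  rw [List.getD_eq_getElem _ []
    (show r.toNat < (List.replicate hn (List.replicate wn x)).length by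
      simp only [List.length_replicate]; omega)]
  simp only [List.getElem_replicate]
  rw [List.getD_eq_getElem _ d
    (show c.toNat < (List.replicate wn x).length by
      simp only [List.length_replicate]; omega)]
  simp only [List.getElem_replicate]

theorem Wf_gset {α : Type} (m : List (List α)) (hn wn : Nat) (r c : Int) (v : α)
    (hm : Wf m hn wn) (hp : Inb hn wn (r, c)) : Wf (gset m r c v) hn wn := by
  obtain ⟨h1, h2, h3, h4⟩ := hp
  rw [gset_nonneg m r c v h1 h3]
  refine ⟨by simpa using hm.1, ?_⟩
  intro row hrow
  rcases List.mem_or_eq_of_mem_set hrow with h | h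
  · exact hm.2 row h
  · subst h
    rw [List.length_set]
    have hlt : r.toNat < m.length := by rw [hm.1]; omega
    exact hm.2 _ (List.getD_eq_getElem m [] hlt ▸ List.getElem_mem hlt)


-- invariant of the neighbour-scan fold
def NbP (g : List (List Int)) (bg : Int) (hn wn : Nat) (P : Int × Int → Prop) (K : Nat)
    (s : List (List Bool) × List (Int × Int)) : Prop :=
  Wf s.1 hn wn ∧ (∀ p ∈ s.2, Inb hn wn p ∧ gget g 0 p.1 p.2 ≠ bg) ∧
  (∀ p, Inb hn wn p → (gget s.1 false p.1 p.2 = true ↔ P p ∨ p ∈ s.2)) ∧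
  cf s.1 + s.2.length ≤ K

theorem nbr_step_inv (g : List (List Int)) (bg : Int) (hn wn : Nat)
    (P : Int × Int → Prop) (K : Nat) (cr cc : Int)
    (s : List (List Bool) × List (Int × Int)) (d : Int × Int)
    (hs : NbP g bg hn wn P K s) :
    NbP g bg hn wn P K (nbr_step g bg (hn : Int) (wn : Int) cr cc s d) := by
  obtain ⟨hwf, hstk, hiff, hcf⟩ := hs
  unfold nbr_step
  dsimp only
  split
  case isTrue hcond =>
    obtain ⟨g1, g2, g3, g4, g5, g6⟩ := hcond
    have hInb : Inb hn wn (cr + d.1, cc + d.2) := ⟨g1, g2, g3, g4⟩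
    refine ⟨Wf_gset _ hn wn _ _ true hwf hInb, ?_, ?_, ?_⟩
    · intro p hp
      rcases List.mem_cons.mp hp with h | h
      · subst h; exact ⟨hInb, g6⟩
      · exact hstk p h
    · intro p hp
      rw [gget_gset s.1 false hn wn (cr + d.1) (cc + d.2) p.1 p.2 true hwf hInb hp]
      by_cases hpe : p.1 = cr + d.1 ∧ p.2 = cc + d.2
      · rw [if_pos hpe]
        have : p = (cr + d.1, cc + d.2) := Prod.ext hpe.1 hpe.2
        simp [this]
      · rw [if_neg hpe]
        have hne : p ≠ (cr + d.1, cc + d.2) := by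
          intro h; exact hpe ⟨by rw [h], by rw [h]⟩
        rw [hiff p hp]
        simp [List.mem_cons, hne]
    · have := cf_gset s.1 hn wn (cr + d.1) (cc + d.2) hwf hInb g5
      simp only [List.length_cons]
      omega
  case isFalse => exact ⟨hwf, hstk, hiff, hcf⟩

theorem nbr_fold_inv (g : List (List Int)) (bg : Int) (hn wn : Nat)
    (P : Int × Int → Prop) (K : Nat) (cr cc : Int) (ds : List (Int × Int)) :
    ∀ s : List (List Bool) × List (Int × Int), NbP g bg hn wn P K s →
      NbP g bg hn wn P K (ds.foldl (nbr_step g bg (hn : Int) (wn : Int) cr cc) s) := by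
  induction ds with
  | nil => intro s hs; exact hs
  | cons d ds ih =>
      intro s hs
      exact ih _ (nbr_step_inv g bg hn wn P K cr cc s d hs)

theorem nbr_fold_stack_mono (g : List (List Int)) (bg : Int) (h w cr cc : Int)
    (ds : List (Int × Int)) :
    ∀ (s : List (List Bool) × List (Int × Int)) (p : Int × Int), p ∈ s.2 →
      p ∈ (ds.foldl (nbr_step g bg h w cr cc) s).2 := by
  induction ds with
  | nil => intro s p hp; exact hp
  | cons d ds ih =>
      intro s p hp
      apply ih
      unfold nbr_step
      dsimp only
      split
      · exact List.mem_cons_of_mem _ hp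
      · exact hp

theorem dfs_spec (g : List (List Int)) (bg : Int) (hn wn : Nat) (ds : List (Int × Int)) :
    ∀ (fuel : Nat) (vis : List (List Bool)) (stk : List (Int × Int))
      (obj : List (Int × Int × Int)) (P : Int × Int → Prop),
      Wf vis hn wn →
      (∀ p ∈ stk, Inb hn wn p ∧ gget g 0 p.1 p.2 ≠ bg) →
      (∀ p, Inb hn wn p →
        (gget vis false p.1 p.2 = true ↔ P p ∨ p ∈ stk ∨ p ∈ cellsOf obj)) →
      (∀ t ∈ obj, Tt g bg hn wn t) →
      cf vis + stk.length ≤ fuel →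
      Wf (dfs_py g bg (hn : Int) (wn : Int) ds fuel vis stk obj).1 hn wn ∧
      (∀ p, Inb hn wn p →
        (gget (dfs_py g bg (hn : Int) (wn : Int) ds fuel vis stk obj).1 false p.1 p.2 = true ↔
          P p ∨ p ∈ cellsOf (dfs_py g bg (hn : Int) (wn : Int) ds fuel vis stk obj).2)) ∧
      (∀ t ∈ (dfs_py g bg (hn : Int) (wn : Int) ds fuel vis stk obj).2, Tt g bg hn wn t) ∧
      (∀ t ∈ obj, t ∈ (dfs_py g bg (hn : Int) (wn : Int) ds fuel vis stk obj).2) ∧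
      (∀ p ∈ stk, p ∈ cellsOf (dfs_py g bg (hn : Int) (wn : Int) ds fuel vis stk obj).2) := by
  intro fuel
  induction fuel with
  | zero =>
      intro vis stk obj P hwf hstk hiff hobj hcf
      cases stk with
      | nil =>
          simp only [dfs_py]
          refine ⟨hwf, ?_, hobj, fun t ht => ht, fun p hp => absurd hp (List.not_mem_nil)⟩
          intro p hp
          rw [hiff p hp]
          simp
      | cons q stk' =>
          simp only [List.length_cons] at hcf
          have : cf vis + (stk'.length + 1) ≤ 0 := hcf
          omega
  | succ fuel ih =>
      intro vis stk obj P hwf hstk hiff hobj hcf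
      cases stk with
      | nil =>
          simp only [dfs_py]
          refine ⟨hwf, ?_, hobj, fun t ht => ht, fun p hp => absurd hp (List.not_mem_nil)⟩
          intro p hp
          rw [hiff p hp]
          simp
      | cons q rest =>
          obtain ⟨cr, cc⟩ := q
          have hhead := hstk (cr, cc) List.mem_cons_self
          have hcells : ∀ p : Int × Int,
              p ∈ cellsOf (obj ++ [(cr, cc, gget g 0 cr cc)]) ↔ p ∈ cellsOf obj ∨ p = (cr, cc) := by
            intro p
            rw [cellsOf_append]
            simp [cellsOf, eq_comm]
          have hiff0 : ∀ p, Inb hn wn p → (gget vis false p.1 p.2 = true ↔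
              (P p ∨ p ∈ cellsOf (obj ++ [(cr, cc, gget g 0 cr cc)])) ∨ p ∈ rest) := by
            intro p hp
            rw [hiff p hp, hcells p]
            simp only [List.mem_cons]
            tauto
          have hnb := nbr_fold_inv g bg hn wn
            (fun p => P p ∨ p ∈ cellsOf (obj ++ [(cr, cc, gget g 0 cr cc)]))
            (cf vis + rest.length) cr cc ds (vis, rest)
            ⟨hwf, fun p hp => hstk p (List.mem_cons_of_mem _ hp), hiff0, le_refl _⟩
          obtain ⟨hwf1, hstk1, hiff1, hcf1⟩ := hnb
          have hiff1' : ∀ p, Inb hn wn p →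
              (gget (ds.foldl (nbr_step g bg (hn : Int) (wn : Int) cr cc) (vis, rest)).1
                  false p.1 p.2 = true ↔
                P p ∨ p ∈ (ds.foldl (nbr_step g bg (hn : Int) (wn : Int) cr cc) (vis, rest)).2 ∨
                  p ∈ cellsOf (obj ++ [(cr, cc, gget g 0 cr cc)])) := by
            intro p hp
            rw [hiff1 p hp]
            tauto
          have hobj1 : ∀ t ∈ obj ++ [(cr, cc, gget g 0 cr cc)], Tt g bg hn wn t := by
            intro t ht
            rcases List.mem_append.mp ht with h | h
            · exact hobj t h
            · rcases List.mem_singleton.mp h with rfl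
              exact ⟨hhead.1, hhead.2, rfl⟩
          have hcf1' : cf (ds.foldl (nbr_step g bg (hn : Int) (wn : Int) cr cc) (vis, rest)).1 +
              (ds.foldl (nbr_step g bg (hn : Int) (wn : Int) cr cc) (vis, rest)).2.length ≤ fuel := by
            simp only [List.length_cons] at hcf
            omega
          have hmain := ih (ds.foldl (nbr_step g bg (hn : Int) (wn : Int) cr cc) (vis, rest)).1
            (ds.foldl (nbr_step g bg (hn : Int) (wn : Int) cr cc) (vis, rest)).2
            (obj ++ [(cr, cc, gget g 0 cr cc)]) P hwf1 hstk1 hiff1' hobj1 hcf1'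
          simp only [dfs_py]
          refine ⟨hmain.1, hmain.2.1, hmain.2.2.1, ?_, ?_⟩
          · intro t ht
            exact hmain.2.2.2.1 t (List.mem_append_left _ ht)
          · intro p hp
            rcases List.mem_cons.mp hp with h | h
            · subst h
              have hmem := hmain.2.2.2.1 (cr, cc, gget g 0 cr cc)
                (List.mem_append_right _ (List.mem_singleton.mpr rfl))
              exact (mem_cellsOf _ _).mpr ⟨_, hmem, rfl⟩
            · exact hmain.2.2.2.2 p
                (nbr_fold_stack_mono g bg (hn : Int) (wn : Int) cr cc ds (vis, rest) p h)

-- outer-loop invariant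
def OInv (g : List (List Int)) (bg : Int) (hn wn : Nat)
    (s : List (List Bool) × List (List (Int × Int × Int))) : Prop :=
  Wf s.1 hn wn ∧
  (∀ p, Inb hn wn p → (gget s.1 false p.1 p.2 = true ↔ p ∈ cellsOf s.2.flatten)) ∧
  (∀ t ∈ s.2.flatten, Tt g bg hn wn t)

-- the body of the outer double loop, one cell (proof-side name for the port's lambda)
def cellStep (g : List (List Int)) (bg : Int)
    (s : List (List Bool) × List (List (Int × Int × Int))) (r c : Int) :
    List (List Bool) × List (List (Int × Int × Int)) :=
  if gget s.1 false r c = false ∧ gget g 0 r c ≠ bg then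
    let vis' := gset s.1 r c true
    let res := dfs_py g bg (g.length : Int) ((g.headD []).length : Int)
      [(-1, 0), (1, 0), (0, -1), (0, 1)] (g.length * (g.headD []).length + 1) vis' [(r, c)] []
    (res.1, s.2 ++ [res.2])
  else s

theorem objects_py_eq (g : List (List Int)) (bg : Int) :
    objects_py g bg 4 =
      ((PySem.List.pyRange 0 (g.length : Int) 1).foldl (fun s r =>
        (PySem.List.pyRange 0 ((g.headD []).length : Int) 1).foldl (fun s c => cellStep g bg s r c) s)
        (List.replicate g.length (List.replicate (g.headD []).length false),
          ([] : List (List (Int × Int × Int))))).2 := rfl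

theorem cells_flatten_append (objs : List (List (Int × Int × Int))) (o : List (Int × Int × Int)) :
    cellsOf ((objs ++ [o]).flatten) = cellsOf objs.flatten ++ cellsOf o := by
  simp [cellsOf]

theorem cellStep_spec (g : List (List Int)) (bg : Int) (r c : Int)
    (hr : 0 ≤ r ∧ r < (g.length : Int))
    (hc : 0 ≤ c ∧ c < ((g.headD []).length : Int))
    (s : List (List Bool) × List (List (Int × Int × Int)))
    (hs : OInv g bg g.length (g.headD []).length s) :
    OInv g bg g.length (g.headD []).length (cellStep g bg s r c) ∧
    (∀ p ∈ cellsOf s.2.flatten, p ∈ cellsOf (cellStep g bg s r c).2.flatten) ∧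
    (gget g 0 r c ≠ bg → (r, c) ∈ cellsOf (cellStep g bg s r c).2.flatten) := by
  obtain ⟨hwf, hiff, hT⟩ := hs
  have hInb : Inb g.length (g.headD []).length (r, c) := ⟨hr.1, hr.2, hc.1, hc.2⟩
  unfold cellStep
  split
  case isTrue hcond =>
    obtain ⟨hv, hbg⟩ := hcond
    have hwf' := Wf_gset s.1 g.length (g.headD []).length r c true hwf hInb
    have hcf' := cf_gset s.1 g.length (g.headD []).length r c hwf hInb hv
    have hiffd : ∀ p, Inb g.length (g.headD []).length p →
        (gget (gset s.1 r c true) false p.1 p.2 = true ↔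
          p ∈ cellsOf s.2.flatten ∨ p ∈ [(r, c)] ∨ p ∈ cellsOf ([] : List (Int × Int × Int))) := by
      intro p hp
      rw [gget_gset s.1 false g.length (g.headD []).length r c p.1 p.2 true hwf hInb hp]
      by_cases hpe : p.1 = r ∧ p.2 = c
      · have : p = (r, c) := Prod.ext hpe.1 hpe.2
        simp [this]
      · have hne : p ≠ (r, c) := by
          intro h; exact hpe ⟨by rw [h], by rw [h]⟩
        rw [if_neg hpe, hiff p hp]
        simp [cellsOf, hne]
    have hd := dfs_spec g bg g.length (g.headD []).length [(-1, 0), (1, 0), (0, -1), (0, 1)]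
      (g.length * (g.headD []).length + 1) (gset s.1 r c true) [(r, c)] []
      (fun p => p ∈ cellsOf s.2.flatten) hwf'
      (by intro p hp; rcases List.mem_singleton.mp hp with rfl; exact ⟨hInb, hbg⟩)
      hiffd (by intro t ht; cases ht)
      (by
        have := cf_le s.1 g.length (g.headD []).length hwf
        simp only [List.length_singleton]
        omega)
    refine ⟨⟨hd.1, ?_, ?_⟩, ?_, ?_⟩
    · intro p hp
      rw [hd.2.1 p hp, cells_flatten_append]
      simp
    · intro t ht
      rw [List.flatten_append] at ht
      rcases List.mem_append.mp ht with h | h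
      · exact hT t h
      · simp only [List.flatten_cons, List.flatten_nil, List.append_nil] at h
        exact hd.2.2.1 t h
    · intro p hp
      rw [cells_flatten_append]
      exact List.mem_append_left _ hp
    · intro _
      rw [cells_flatten_append]
      exact List.mem_append_right _ (hd.2.2.2.2 (r, c) List.mem_cons_self)
  case isFalse hcond =>
    refine ⟨⟨hwf, hiff, hT⟩, fun p hp => hp, ?_⟩
    intro hbg
    have hv : gget s.1 false r c = true := by
      rcases Bool.eq_false_or_eq_true (gget s.1 false r c) with h | h
      · exact h
      · exact absurd ⟨h, hbg⟩ hcond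
    exact (hiff (r, c) hInb).mp hv

theorem inner_fold_spec (g : List (List Int)) (bg : Int) (r : Int)
    (hr : 0 ≤ r ∧ r < (g.length : Int)) :
    ∀ (cs : List Int), (∀ c ∈ cs, 0 ≤ c ∧ c < ((g.headD []).length : Int)) →
    ∀ s, OInv g bg g.length (g.headD []).length s →
    OInv g bg g.length (g.headD []).length (cs.foldl (fun s c => cellStep g bg s r c) s) ∧
    (∀ p ∈ cellsOf s.2.flatten, p ∈ cellsOf (cs.foldl (fun s c => cellStep g bg s r c) s).2.flatten) ∧
    (∀ c ∈ cs, gget g 0 r c ≠ bg →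
      (r, c) ∈ cellsOf (cs.foldl (fun s c => cellStep g bg s r c) s).2.flatten) := by
  intro cs
  induction cs with
  | nil =>
      intro _ s hs
      exact ⟨hs, fun p hp => hp, fun c hc => absurd hc (List.not_mem_nil)⟩
  | cons c cs ih =>
      intro hcs s hs
      have hc := hcs c List.mem_cons_self
      have hstep := cellStep_spec g bg r c hr hc s hs
      have hrest := ih (fun c' hc' => hcs c' (List.mem_cons_of_mem _ hc')) _ hstep.1
      refine ⟨hrest.1, ?_, ?_⟩
      · intro p hp
        exact hrest.2.1 p (hstep.2.1 p hp)
      · intro c' hc' hbg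
        rcases List.mem_cons.mp hc' with h | h
        · subst h
          exact hrest.2.1 _ (hstep.2.2 hbg)
        · exact hrest.2.2 c' h hbg

theorem outer_fold_spec (g : List (List Int)) (bg : Int) :
    ∀ (rs : List Int), (∀ r ∈ rs, 0 ≤ r ∧ r < (g.length : Int)) →
    ∀ s, OInv g bg g.length (g.headD []).length s →
    OInv g bg g.length (g.headD []).length
      (rs.foldl (fun s r =>
        (PySem.List.pyRange 0 ((g.headD []).length : Int) 1).foldl (fun s c => cellStep g bg s r c) s) s) ∧
    (∀ p ∈ cellsOf s.2.flatten, p ∈ cellsOf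
      (rs.foldl (fun s r =>
        (PySem.List.pyRange 0 ((g.headD []).length : Int) 1).foldl (fun s c => cellStep g bg s r c) s) s).2.flatten) ∧
    (∀ r ∈ rs, ∀ c : Int, 0 ≤ c → c < ((g.headD []).length : Int) → gget g 0 r c ≠ bg →
      (r, c) ∈ cellsOf
        (rs.foldl (fun s r =>
          (PySem.List.pyRange 0 ((g.headD []).length : Int) 1).foldl (fun s c => cellStep g bg s r c) s) s).2.flatten) := by
  intro rs
  induction rs with
  | nil =>
      intro _ s hs
      exact ⟨hs, fun p hp => hp, fun r hr => absurd hr (List.not_mem_nil)⟩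
  | cons r rs ih =>
      intro hrs s hs
      have hr := hrs r List.mem_cons_self
      have hcs : ∀ c ∈ PySem.List.pyRange 0 ((g.headD []).length : Int) 1,
          0 ≤ c ∧ c < ((g.headD []).length : Int) := by
        intro c hmem
        exact PySem.List.mem_pyRange_one.mp hmem
      have hstep := inner_fold_spec g bg r hr _ hcs s hs
      have hrest := ih (fun r' hr' => hrs r' (List.mem_cons_of_mem _ hr')) _ hstep.1
      refine ⟨hrest.1, ?_, ?_⟩
      · intro p hp
        exact hrest.2.1 p (hstep.2.1 p hp)
      · intro r' hr' c hc0 hc1 hbg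
        rcases List.mem_cons.mp hr' with h | h
        · subst h
          refine hrest.2.1 _ (hstep.2.2 c ?_ hbg)
          exact PySem.List.mem_pyRange_one.mpr ⟨hc0, hc1⟩
        · exact hrest.2.2 r' h c hc0 hc1 hbg

theorem objects_spec (g : List (List Int)) (bg : Int) :
    (∀ t ∈ (objects_py g bg 4).flatten, Tt g bg g.length (g.headD []).length t) ∧
    (∀ p, Inb g.length (g.headD []).length p → gget g 0 p.1 p.2 ≠ bg →
      p ∈ cellsOf (objects_py g bg 4).flatten) := by
  have hs0 : OInv g bg g.length (g.headD []).length
      (List.replicate g.length (List.replicate (g.headD []).length false),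
        ([] : List (List (Int × Int × Int)))) := by
    refine ⟨Wf_replicate _ _ false, ?_, ?_⟩
    · intro p hp
      rw [gget_replicate false g.length (g.headD []).length p.1 p.2 false hp]
      simp [cellsOf]
    · intro t ht
      simp at ht
  have hrs : ∀ r ∈ PySem.List.pyRange 0 (g.length : Int) 1, 0 ≤ r ∧ r < (g.length : Int) := by
    intro r hmem
    exact PySem.List.mem_pyRange_one.mp hmem
  have h := outer_fold_spec g bg _ hrs _ hs0
  rw [objects_py_eq g bg]
  refine ⟨h.1.2.2, ?_⟩
  intro p hp hbg
  have := h.2.2 p.1 (PySem.List.mem_pyRange_one.mpr ⟨hp.1, hp.2.1⟩) p.2 hp.2.2.1 hp.2.2.2 hbg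
  simpa using this

theorem writes_spec (g : List (List Int)) (bg dr dc : Int) (hn wn : Nat) :
    ∀ (ts : List (Int × Int × Int)) (res : List (List Int)),
      Wf res hn wn →
      (∀ t ∈ ts, t.2.2 = gget g 0 t.1 t.2.1) →
      Wf (ts.foldl (write_step (hn : Int) (wn : Int) dr dc) res) hn wn ∧
      (∀ p, Inb hn wn p →
        gget (ts.foldl (write_step (hn : Int) (wn : Int) dr dc) res) 0 p.1 p.2 =
          if (p.1 - dr, p.2 - dc) ∈ cellsOf ts then gget g 0 (p.1 - dr) (p.2 - dc)
          else gget res 0 p.1 p.2) := by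
  intro ts
  induction ts with
  | nil =>
      intro res hwf _
      simp only [List.foldl_nil]
      refine ⟨hwf, ?_⟩
      intro p _
      simp [cellsOf]
  | cons t ts ih =>
      intro res hwf hv
      have hv' : ∀ t' ∈ ts, t'.2.2 = gget g 0 t'.1 t'.2.1 :=
        fun t' ht' => hv t' (List.mem_cons_of_mem _ ht')
      have hwf' : Wf (write_step (hn : Int) (wn : Int) dr dc res t) hn wn := by
        unfold write_step
        dsimp only
        split
        case isTrue hg => exact Wf_gset res hn wn _ _ _ hwf ⟨hg.1, hg.2.1, hg.2.2.1, hg.2.2.2⟩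
        case isFalse => exact hwf
      have hrest := ih (write_step (hn : Int) (wn : Int) dr dc res t) hwf' hv'
      simp only [List.foldl_cons]
      refine ⟨hrest.1, ?_⟩
      intro p hp
      rw [hrest.2 p hp]
      have hcells : cellsOf (t :: ts) = (t.1, t.2.1) :: cellsOf ts := rfl
      by_cases hm : (p.1 - dr, p.2 - dc) ∈ cellsOf ts
      · rw [if_pos hm, if_pos (by rw [hcells]; exact List.mem_cons_of_mem _ hm)]
      · rw [if_neg hm]
        unfold write_step
        dsimp only
        by_cases hsrc : (t.1, t.2.1) = ((p.1 - dr, p.2 - dc) : Int × Int)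
        · have h1 : t.1 = p.1 - dr := congrArg Prod.fst hsrc
          have h2 : t.2.1 = p.2 - dc := congrArg (fun q : Int × Int => q.2) hsrc
          have hg : 0 ≤ t.1 + dr ∧ t.1 + dr < (hn : Int) ∧ 0 ≤ t.2.1 + dc ∧ t.2.1 + dc < (wn : Int) := by
            obtain ⟨q1, q2, q3, q4⟩ := hp
            constructor
            · omega
            constructor
            · omega
            constructor
            · omega
            · omega
          rw [if_pos hg]
          rw [gget_gset res 0 hn wn (t.1 + dr) (t.2.1 + dc) p.1 p.2 t.2.2 hwf
            ⟨hg.1, hg.2.1, hg.2.2.1, hg.2.2.2⟩ hp]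
          rw [if_pos (by omega : p.1 = t.1 + dr ∧ p.2 = t.2.1 + dc)]
          rw [if_pos (by rw [hcells, hsrc]; exact List.mem_cons_self)]
          rw [hv t List.mem_cons_self, h1, h2]
        · have hnm : (p.1 - dr, p.2 - dc) ∉ cellsOf (t :: ts) := by
            rw [hcells]
            intro hmem
            rcases List.mem_cons.mp hmem with h | h
            · exact hsrc h.symm
            · exact hm h
          rw [if_neg hnm]
          split
          next hg =>
            rw [gget_gset res 0 hn wn (t.1 + dr) (t.2.1 + dc) p.1 p.2 t.2.2 hwf
              ⟨hg.1, hg.2.1, hg.2.2.1, hg.2.2.2⟩ hp]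
            rw [if_neg (by
              intro hcontra
              apply hsrc
              have := hcontra.1
              have := hcontra.2
              exact Prod.ext (by omega) (by omega))]
          next => rfl

theorem move_eq (g : List (List Int)) (dr dc : Int) :
    move_objs_py g dr dc = move_objs_py_alt g dr dc := by
  have hobjs := objects_spec g (bg_py g)
  have hmemiff : ∀ p : Int × Int, p ∈ cellsOf (objects_py g (bg_py g) 4).flatten ↔
      Inb g.length (g.headD []).length p ∧ gget g 0 p.1 p.2 ≠ bg_py g := by
    intro p
    constructor
    · intro hp
      obtain ⟨t, ht, hpt⟩ := (mem_cellsOf _ _).mp hp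
      have hTt := hobjs.1 t ht
      rw [← hpt]
      exact ⟨hTt.1, hTt.2.1⟩
    · intro hcond
      exact hobjs.2 p hcond.1 hcond.2
  have hw := writes_spec g (bg_py g) dr dc g.length (g.headD []).length
    (objects_py g (bg_py g) 4).flatten
    (List.replicate g.length (List.replicate (g.headD []).length (bg_py g)))
    (Wf_replicate _ _ _)
    (fun t ht => (hobjs.1 t ht).2.2)
  have hA : move_objs_py g dr dc =
      (objects_py g (bg_py g) 4).flatten.foldl
        (write_step (g.length : Int) ((g.headD []).length : Int) dr dc)
        (List.replicate g.length (List.replicate (g.headD []).length (bg_py g))) := by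
    unfold move_objs_py
    exact Eq.symm List.foldl_flatten
  rw [hA]
  have hlenB : (move_objs_py_alt g dr dc).length = g.length := by
    unfold move_objs_py_alt
    simp [PySem.List.length_pyRange_one]
  apply List.ext_getElem
  · rw [hw.1.1, hlenB]
  · intro i hi1 hi2
    have hi : i < g.length := by rw [← hw.1.1]; exact hi1
    have hrowB : (move_objs_py_alt g dr dc)[i] =
        (PySem.List.pyRange 0 ((g.headD []).length : Int) 1).map (fun c =>
          if (0 ≤ (i : Int) - dr ∧ (i : Int) - dr < (g.length : Int) ∧
              0 ≤ c - dc ∧ c - dc < ((g.headD []).length : Int)) ∧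
              gget g 0 ((i : Int) - dr) (c - dc) ≠ bg_py g
          then gget g 0 ((i : Int) - dr) (c - dc) else bg_py g) := by
      unfold move_objs_py_alt
      rw [List.getElem_map, PySem.List.getElem_pyRange_one]
      simp only [zero_add]
    rw [hrowB]
    have hrowAlen : ((objects_py g (bg_py g) 4).flatten.foldl
        (write_step (g.length : Int) ((g.headD []).length : Int) dr dc)
        (List.replicate g.length (List.replicate (g.headD []).length (bg_py g))))[i].length =
        (g.headD []).length :=
      hw.1.2 _ (List.getElem_mem hi1)
    apply List.ext_getElem
    · rw [hrowAlen]
      simp [PySem.List.length_pyRange_one]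
    · intro j hj1 hj2
      have hj : j < (g.headD []).length := by rw [← hrowAlen]; exact hj1
      rw [List.getElem_map, PySem.List.getElem_pyRange_one]
      simp only [zero_add]
      have hInb : Inb g.length (g.headD []).length ((i : Int), (j : Int)) := by
        unfold Inb
        dsimp only
        exact ⟨by positivity, by exact_mod_cast hi, by positivity, by exact_mod_cast hj⟩
      have hpt := hw.2 ((i : Int), (j : Int)) hInb
      have hentryA : ((objects_py g (bg_py g) 4).flatten.foldl
          (write_step (g.length : Int) ((g.headD []).length : Int) dr dc)
          (List.replicate g.length (List.replicate (g.headD []).length (bg_py g))))[i][j] =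
          gget ((objects_py g (bg_py g) 4).flatten.foldl
            (write_step (g.length : Int) ((g.headD []).length : Int) dr dc)
            (List.replicate g.length (List.replicate (g.headD []).length (bg_py g)))) 0
            (i : Int) (j : Int) := by
        rw [gget_nonneg _ 0 _ _ (by positivity) (by positivity)]
        simp only [Int.toNat_natCast]
        rw [List.getD_eq_getElem _ [] hi1, List.getD_eq_getElem _ 0 hj1]
      rw [hentryA, hpt]
      rw [gget_replicate (0 : Int) g.length (g.headD []).length (i : Int) (j : Int) (bg_py g) hInb]
      by_cases hm : ((i : Int) - dr, (j : Int) - dc) ∈ cellsOf (objects_py g (bg_py g) 4).flatten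
      · have hc := (hmemiff _).mp hm
        rw [if_pos hm, if_pos ⟨⟨hc.1.1, hc.1.2.1, hc.1.2.2.1, hc.1.2.2.2⟩, hc.2⟩]
      · rw [if_neg hm, if_neg (fun hc => hm ((hmemiff _).mpr
          ⟨⟨hc.1.1, hc.1.2.1, hc.1.2.2.1, hc.1.2.2.2⟩, hc.2⟩))]

-- ===== VERDICT (by name: the statement is the Claim_ definition above) =====
theorem move_objs_py_spec : Claim_equal_move_objs_py := by
  intro g dr dc _ _
  unfold Spec_move_objs_py
  exact move_eq g dr dc
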